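-- pv_equiv track=rewrite | github.com/ariestahrt/fish-hunter-worker | utils/css_utils.py | compare_two_dict
-- ===== SOURCE A (Python) =====
-- def compare_two_dict(dict1, dict2):
--     total_comp = 0
--     total_match = 0
--
--     for prop1 in dict1.keys():
--         for value1 in dict1[prop1]:
--             total_comp += 1
--             if prop1 in dict2.keys():
--                 if value1 in dict2[prop1]:
--                     values2 = dict2[prop1]
--                     total_match+=1
--
--     return total_match, total_comp
-- ===== SOURCE B (Python) =====
-- def compare_two_dict(dict1, dict2):
--     pairs1 = [(p, v) for p, vs in dict1.items() for v in vs]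
--     pairs2 = {(p, v) for p, vs in dict2.items() for v in vs}
--     total_match = sum(1 for pr in pairs1 if pr in pairs2)
--     return total_match, len(pairs1)
-- ===== Notes on version B (the rewrite author's own statement) =====
-- stated objective: alternative
-- what changed: Flattens both dicts to (property, value) pairs: one global set of dict2's pairs replaces A's per-element key test and inner value-list scan, and the counters become a length and a membership count over the flattened pair list.
import Mathlib
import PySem

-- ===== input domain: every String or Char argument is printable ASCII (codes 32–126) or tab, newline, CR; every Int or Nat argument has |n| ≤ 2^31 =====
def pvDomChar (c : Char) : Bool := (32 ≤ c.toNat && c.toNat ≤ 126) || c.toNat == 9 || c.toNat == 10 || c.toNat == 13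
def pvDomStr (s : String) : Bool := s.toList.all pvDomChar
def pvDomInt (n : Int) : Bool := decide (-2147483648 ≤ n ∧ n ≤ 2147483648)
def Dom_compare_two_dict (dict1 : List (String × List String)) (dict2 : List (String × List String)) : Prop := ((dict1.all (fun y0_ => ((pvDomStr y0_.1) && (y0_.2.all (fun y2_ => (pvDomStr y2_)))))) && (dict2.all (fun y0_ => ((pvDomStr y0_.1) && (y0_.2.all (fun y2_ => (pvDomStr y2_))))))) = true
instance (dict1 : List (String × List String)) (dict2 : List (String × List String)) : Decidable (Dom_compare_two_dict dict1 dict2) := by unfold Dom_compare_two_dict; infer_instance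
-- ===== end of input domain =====

-- B flattens both dicts to (property, value) pairs and counts dict1's pair list against one
-- global set of dict2's pairs, replacing A's nested per-key/per-value accumulating loop.

-- ===== PORT A =====
-- literal transliteration: for prop1 in dict1.keys(): for value1 in dict1[prop1]:
--   total_comp += 1; if prop1 in dict2.keys(): if value1 in dict2[prop1]: total_match += 1
def compare_two_dict (dict1 : List (String × List String)) (dict2 : List (String × List String)) : List Int :=
  let d1 := PySem.Dict.ofList dict1
  let d2 := PySem.Dict.ofList dict2
  let r : Int × Int := d1.keys.foldl (fun acc prop1 =>
      (d1.getD prop1 []).foldl (fun acc value1 =>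
        let total_comp := acc.2 + 1
        let total_match :=
          if d2.contains prop1 then
            if (d2.getD prop1 []).contains value1 then acc.1 + 1 else acc.1
          else acc.1
        (total_match, total_comp)) acc) (0, 0)
  [r.1, r.2]

-- ===== PORT B =====
-- literal transliteration of Source B: pairs1 = [(p,v) for p,vs in dict1.items() for v in vs];
-- pairs2 = {(p,v) for p,vs in dict2.items() for v in vs};
-- total_match = sum(1 for pr in pairs1 if pr in pairs2); return total_match, len(pairs1)
def compare_two_dict_alt (dict1 : List (String × List String)) (dict2 : List (String × List String)) : List Int :=
  let d1 := PySem.Dict.ofList dict1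
  let d2 := PySem.Dict.ofList dict2
  let pairs1 := d1.items.flatMap (fun p => p.2.map (fun v => (p.1, v)))
  let pairs2 := PySem.Set.ofList (d2.items.flatMap (fun p => p.2.map (fun v => (p.1, v))))
  let total_match : Int := (pairs1.countP (fun pr => pairs2.contains pr) : Int)
  [total_match, (pairs1.length : Int)]

-- ===== PRECONDITION & SPEC =====
def Spec_compare_two_dict (dict1 : List (String × List String)) (dict2 : List (String × List String)) (out : List Int) : Prop := out = compare_two_dict_alt dict1 dict2
instance (dict1 : List (String × List String)) (dict2 : List (String × List String)) (out : List Int) : Decidable (Spec_compare_two_dict dict1 dict2 out) := by unfold Spec_compare_two_dict; infer_instance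

-- ===== CLAIM (what is proved, stated in full; the proofs are below) =====
def Claim_equal_compare_two_dict : Prop := ∀ (dict1 : List (String × List String)) (dict2 : List (String × List String)), Dom_compare_two_dict dict1 dict2 → Spec_compare_two_dict dict1 dict2 (compare_two_dict dict1 dict2)

-- ===== LEMMAS AND PROOFS =====

-- A's nested branch as one boolean conjunction
theorem pv_ifif (a b : Bool) (x : Int) :
    (if a = true then (if b = true then x + 1 else x) else x)
      = (if (a && b) = true then x + 1 else x) := by
  cases a <;> cases b <;> simp

-- A's inner loop over one value list adds the per-key count to .1 and the length to .2
theorem pv_inner (P : String → Bool) (vs : List String) (m c : Int) :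
    vs.foldl (fun acc v =>
        (if P v = true then acc.1 + 1 else acc.1, acc.2 + 1)) (m, c)
      = (m + (vs.countP P : Int), c + (vs.length : Int)) := by
  induction vs generalizing m c with
  | nil => simp
  | cons v vs ih =>
    simp only [List.foldl_cons, List.countP_cons, List.length_cons, ih]
    by_cases h : P v = true <;> simp [h, Prod.ext_iff] <;> omega

-- A's outer loop over the key list
theorem pv_outer (g : String → List String) (P : String → String → Bool)
    (ks : List String) (m c : Int) :
    ks.foldl (fun acc k =>
        (g k).foldl (fun acc v =>
          (if P k v = true then acc.1 + 1 else acc.1, acc.2 + 1)) acc) (m, c)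
      = (m + ((ks.map (fun k => ((g k).countP (P k) : Int))).sum),
         c + ((ks.map (fun k => ((g k).length : Int))).sum)) := by
  induction ks generalizing m c with
  | nil => simp
  | cons k ks ih =>
    simp only [List.foldl_cons, List.map_cons, List.sum_cons, pv_inner, ih, Prod.ext_iff]
    constructor <;> ring

-- counting over a flattened list is the sum of per-block counts
theorem pv_countP_flatMap {α β : Type} (f : α → List β) (P : β → Bool) (l : List α) :
    (l.flatMap f).countP P = (l.map (fun x => (f x).countP P)).sum := by
  induction l with
  | nil => simp
  | cons x l ih => simp [List.flatMap_cons, List.countP_append, ih]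

-- membership of a pair in the flattened dict equals the key test plus value-list membership
theorem pv_mem_flat (d : PySem.Dict String (List String)) (hnd : d.keys.Nodup)
    (k : String) (v : String) :
    ((k, v) ∈ d.items.flatMap (fun p => p.2.map (fun w => (p.1, w))))
      ↔ (d.contains k = true ∧ v ∈ d.getD k []) := by
  simp only [List.mem_flatMap, List.mem_map]
  constructor
  · rintro ⟨p, hp, w, hw, heq⟩
    obtain ⟨h1, h2⟩ := Prod.mk.injEq .. ▸ heq
    have hget : d.get? k = some p.2 := by
      have hm : (k, p.2) ∈ d.items := by
        have hpk : p = (k, p.2) := by cases p; simp_all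
        rw [← hpk]; exact hp
      exact PySem.Dict.get?_of_mem_items d hm hnd
    refine ⟨?_, ?_⟩
    · rw [PySem.Dict.contains_eq_isSome_get?, hget]; rfl
    · rw [PySem.Dict.getD_of_get?_eq_some d [] hget]; exact h2 ▸ hw
  · rintro ⟨hc, hv⟩
    rw [PySem.Dict.contains_eq_isSome_get?] at hc
    obtain ⟨vs, hget⟩ := Option.isSome_iff_exists.mp hc
    refine ⟨(k, vs), PySem.Dict.mem_items_of_get?_eq_some d hget, v, ?_, rfl⟩
    rwa [PySem.Dict.getD_of_get?_eq_some d [] hget] at hv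

theorem compare_two_dict_eq (dict1 dict2 : List (String × List String)) :
    compare_two_dict dict1 dict2 = compare_two_dict_alt dict1 dict2 := by
  unfold compare_two_dict compare_two_dict_alt
  set d1 := PySem.Dict.ofList dict1 with hd1
  set d2 := PySem.Dict.ofList dict2 with hd2
  have hnd1 : d1.keys.Nodup := PySem.Dict.nodup_keys_ofList dict1
  have hnd2 : d2.keys.Nodup := PySem.Dict.nodup_keys_ofList dict2
  have hitems : d1.items = d1.keys.map (fun k => (k, d1.getD k [])) :=
    PySem.Dict.items_eq_map_keys d1 hnd1 []
  simp only [pv_ifif]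
  rw [pv_outer (fun k => d1.getD k [])
        (fun k v => d2.contains k && (d2.getD k []).contains v) d1.keys 0 0]
  simp only [zero_add, pv_countP_flatMap, List.length_flatMap, hitems, List.map_map,
    List.countP_map, List.length_map]
  congr 1
  · rw [Nat.cast_list_sum, List.map_map]
    congr 1
    apply List.map_congr_left
    intro k _
    simp only [Function.comp_apply]
    congr 1
    apply List.countP_congr
    intro v _
    have hmem := pv_mem_flat d2 hnd2 k v
    simp only [Function.comp_apply, PySem.Set.contains, List.contains_eq_mem,
      PySem.Set.mem_ofList, PySem.Dict.contains_eq_decide_mem_keys]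
    rw [← Bool.decide_and]
    simp only [decide_eq_true_eq]
    rw [← PySem.Dict.contains_iff_mem_keys]
    exact hmem.symm
  · rw [Nat.cast_list_sum, List.map_map]
    simp [Function.comp_def]

-- ===== VERDICT (by name: the statement is the Claim_ definition above) =====
theorem compare_two_dict_spec : Claim_equal_compare_two_dict := by
  intro d1 d2 _
  unfold Spec_compare_two_dict
  exact compare_two_dict_eq d1 d2
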